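-- pv_equiv track=rewrite | github.com/deeraj-kumar18/Python-Codes | DSA/Arrays/Medium/Checkerboard pattern.py | checkerboard1
-- ===== SOURCE A (Python) =====
-- def checkerboard1(n,m):
--     output=[]
--     for i in range(n):
--         innerlist=[]
--         for j in range(m):
--             innerlist.append((i+j)%2) # sum of the indices will result in either 0 or 1. so we append accordingly.
--         output.append(innerlist)
--
--     return output
-- ===== SOURCE B (Python) =====
-- def checkerboard1(n, m):
--     if n <= 0:
--         return []
--     base = [j % 2 for j in range(m)]
--     flip = [1 - x for x in base]
--     return [list(base) if i % 2 == 0 else list(flip) for i in range(n)]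
-- ===== Notes on version B (the rewrite author's own statement) =====
-- stated objective: alternative
-- what changed: Replaces the nested per-cell (i+j)%2 loops with two precomputed template rows (base and its flip) and a single outer comprehension copying the right template per row.
import Mathlib
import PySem

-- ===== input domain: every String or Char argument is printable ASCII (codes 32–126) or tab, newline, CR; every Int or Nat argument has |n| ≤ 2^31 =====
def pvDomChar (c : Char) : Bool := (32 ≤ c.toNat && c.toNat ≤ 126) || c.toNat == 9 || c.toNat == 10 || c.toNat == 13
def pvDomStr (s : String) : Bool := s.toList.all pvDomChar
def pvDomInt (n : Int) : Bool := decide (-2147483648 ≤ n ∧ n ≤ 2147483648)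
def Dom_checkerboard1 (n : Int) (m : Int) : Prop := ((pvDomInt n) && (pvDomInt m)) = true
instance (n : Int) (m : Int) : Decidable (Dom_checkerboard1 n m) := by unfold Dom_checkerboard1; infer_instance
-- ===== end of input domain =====

-- B builds two template rows (base and its flip) and copies one per row, instead of A's per-cell (i+j)%2 computation.


-- ===== PORT A =====
def checkerboard1 (n : Int) (m : Int) : List (List Int) :=
  (PySem.List.pyRange 0 n 1).foldl
    (fun output i =>
      output ++ [(PySem.List.pyRange 0 m 1).foldl
        (fun innerlist j => innerlist ++ [PySem.Int.mod (i + j) 2]) []])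
    []

-- ===== PORT B =====
def checkerboard1_alt (n : Int) (m : Int) : List (List Int) :=
  if n ≤ 0 then [] else
  let base := (PySem.List.pyRange 0 m 1).map (fun j => PySem.Int.mod j 2)
  let flip := base.map (fun x => 1 - x)
  (PySem.List.pyRange 0 n 1).map (fun i => if PySem.Int.mod i 2 = 0 then base else flip)

-- ===== PRECONDITION & SPEC =====
def Spec_checkerboard1 (n : Int) (m : Int) (out : List (List Int)) : Prop := out = checkerboard1_alt n m
instance (n : Int) (m : Int) (out : List (List Int)) : Decidable (Spec_checkerboard1 n m out) := by unfold Spec_checkerboard1; infer_instance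

-- ===== CLAIM (what is proved, stated in full; the proofs are below) =====
def Claim_equal_checkerboard1 : Prop := ∀ (n : Int) (m : Int), Dom_checkerboard1 n m → Spec_checkerboard1 n m (checkerboard1 n m)

-- ===== LEMMAS AND PROOFS =====

-- append-accumulator foldl is map
theorem foldl_append_singleton_eq_map {α β : Type} (f : α → β) (l : List α) (acc : List β) :
    l.foldl (fun a x => a ++ [f x]) acc = acc ++ l.map f := by
  induction l generalizing acc with
  | nil => simp
  | cons x xs ih => simp [List.foldl, ih]

theorem mod2_add (a b : Int) :
    PySem.Int.mod (a + b) 2 = if PySem.Int.mod a 2 = 0 then PySem.Int.mod b 2 else 1 - PySem.Int.mod b 2 := by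
  simp only [PySem.Int.mod_eq_emod_of_pos (show (0:Int) < 2 by norm_num)]
  split_ifs with h <;> omega

-- ===== VERDICT (by name: the statement is the Claim_ definition above) =====
theorem checkerboard1_spec : Claim_equal_checkerboard1 := by
  intro n m _
  unfold Spec_checkerboard1 checkerboard1 checkerboard1_alt
  by_cases hn : n ≤ 0
  · rw [if_pos hn, PySem.List.pyRange_one_eq_nil hn]
    rfl
  rw [if_neg hn]
  rw [foldl_append_singleton_eq_map]
  simp only [List.nil_append]
  apply List.map_congr_left
  intro i _
  rw [foldl_append_singleton_eq_map]
  simp only [List.nil_append, List.map_map]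
  by_cases h : PySem.Int.mod i 2 = 0
  · rw [if_pos h]
    apply List.map_congr_left
    intro j _
    rw [mod2_add, if_pos h]
  · rw [if_neg h]
    apply List.map_congr_left
    intro j _
    simp only [Function.comp]
    rw [mod2_add, if_neg h]
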